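-- pv_equiv track=rewrite | github.com/Danail57/Python_University_Courses | Python_Tasks/Position_od_Min_Digit.py | min_index_position_digit
-- ===== SOURCE A (Python) =====
-- def min_index_position_digit(number):
--     number = str(abs(number))
--     min_digit = int(number[0])
--     min_position = 1
--
--     for index, char in enumerate (number):
--         digit = int(char)
--         if digit < min_digit:
--             min_digit = digit
--             min_position = index + 1
--     return min_position
-- ===== SOURCE B (Python) =====
-- def min_index_position_digit(number):
--     s = str(abs(number))
--     m = min(s)
--     return s.index(m) + 1
-- ===== Notes on version B (the rewrite author's own statement) =====
-- stated objective: simpler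
-- what changed: Replaces the interleaved running-min loop with two separate library steps: min(s) to find the smallest digit character, then s.index to locate its first occurrence.
import Mathlib
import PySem

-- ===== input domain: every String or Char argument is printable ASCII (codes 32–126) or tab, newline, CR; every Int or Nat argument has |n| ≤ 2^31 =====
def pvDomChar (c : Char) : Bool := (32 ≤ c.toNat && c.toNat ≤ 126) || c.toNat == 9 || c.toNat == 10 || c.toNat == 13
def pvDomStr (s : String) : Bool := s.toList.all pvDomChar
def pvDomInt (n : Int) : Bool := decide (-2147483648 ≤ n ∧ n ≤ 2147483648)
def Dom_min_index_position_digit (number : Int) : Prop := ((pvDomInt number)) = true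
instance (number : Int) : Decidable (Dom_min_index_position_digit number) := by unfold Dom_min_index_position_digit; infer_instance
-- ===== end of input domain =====

-- B replaces A's interleaved running-min loop by two library steps (min, then first index); same cost.

-- ===== PORT A =====
-- int(char) for the single decimal-digit characters produced by str(abs(n)): exact there.
def pvDigitVal (c : Char) : Int := (c.toNat : Int) - 48

-- the 'for index, char in enumerate(number)' loop; i is the 1-based position of the head
def pvLoopA : Int → Int → Int → List Char → Int × Int
  | m, p, _, [] => (m, p)
  | m, p, i, c :: t =>
    if pvDigitVal c < m then pvLoopA (pvDigitVal c) i (i + 1) t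
    else pvLoopA m p (i + 1) t

-- min_digit = int(number[0]); min_position = 1; then the loop over enumerate(number)
def pvRunA : List Char → Int
  | [] => 1  -- unreachable: str(abs n) is never empty (Python would raise on number[0])
  | c :: t => (pvLoopA (pvDigitVal c) 1 1 (c :: t)).2

def min_index_position_digit (number : Int) : Int :=
  pvRunA (PySem.Int.toStr (if number < 0 then -number else number)).toList

-- ===== PORT B =====
-- min(s) = first extremal character; s.index(m) = first occurrence (m ∈ s, so index? is some)
def pvRunB : List Char → Int
  | [] => 1  -- unreachable: str(abs n) is never empty
  | c :: t =>
    match PySem.List.min? (c :: t) (fun x => x) with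
    | none => 1  -- unreachable: the list is nonempty
    | some m => ((PySem.List.index? (c :: t) m).getD 0 : Int) + 1

def min_index_position_digit_alt (number : Int) : Int :=
  pvRunB (PySem.Int.toStr (if number < 0 then -number else number)).toList

-- ===== PRECONDITION & SPEC =====
def Spec_min_index_position_digit (number : Int) (out : Int) : Prop := out = min_index_position_digit_alt number
instance (number : Int) (out : Int) : Decidable (Spec_min_index_position_digit number out) := by unfold Spec_min_index_position_digit; infer_instance

-- ===== CLAIM (what is proved, stated in full; the proofs are below) =====
def Claim_equal_min_index_position_digit : Prop := ∀ (number : Int), Dom_min_index_position_digit number → Spec_min_index_position_digit number (min_index_position_digit number)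

-- ===== LEMMAS AND PROOFS =====

lemma pvDigitVal_lt_iff (x c : Char) : pvDigitVal x < pvDigitVal c ↔ x < c := by
  unfold pvDigitVal
  rw [Char.lt_def, UInt32.lt_iff_toNat_lt, Char.toNat_val, Char.toNat_val]
  omega

lemma pvFoldlMin_eq_self {t : List Char} {c : Char} (h : ∀ y ∈ t, c ≤ y) :
    t.foldl min c = c := by
  rcases PySem.List.foldl_min_mem t c with h1 | h1
  · exact h1
  · exact le_antisymm (PySem.List.foldl_min_le t c).1 (h _ h1)

lemma pvLoopA_spec (l : List Char) : ∀ (c : Char) (p i : Int),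
    (pvLoopA (pvDigitVal c) p i l).2 =
      if ∀ x ∈ l, c ≤ x then p
      else i + ((PySem.List.index? l (l.foldl min c)).getD 0 : Int) := by
  induction l with
  | nil => intro c p i; simp [pvLoopA]
  | cons x t ih =>
    intro c p i
    have hcons : ¬ (∀ z ∈ x :: t, c ≤ z) → True := fun _ => trivial
    by_cases h : x < c
    · rw [pvLoopA, if_pos ((pvDigitVal_lt_iff x c).2 h), ih x i (i + 1)]
      have hM : (x :: t).foldl min c = t.foldl min x := by
        simp [List.foldl_cons, min_eq_right (le_of_lt h)]
      have hnc : ¬ (∀ z ∈ x :: t, c ≤ z) := by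
        intro hc; exact absurd (hc x (List.mem_cons_self)) (not_le.2 h)
      by_cases hall : ∀ y ∈ t, x ≤ y
      · have hx : t.foldl min x = x := pvFoldlMin_eq_self hall
        rw [if_pos hall, if_neg hnc, hM, hx, PySem.List.index?_cons_self]
        simp
      · obtain ⟨y, hy, hylt⟩ : ∃ y ∈ t, y < x := by simpa using hall
        have hMlt : t.foldl min x < x := lt_of_le_of_lt ((PySem.List.foldl_min_le t x).2 y hy) hylt
        have hMmem : t.foldl min x ∈ t := by
          rcases PySem.List.foldl_min_mem t x with h1 | h1
          · exact absurd h1 (ne_of_lt hMlt)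
          · exact h1
        obtain ⟨k, hk⟩ := Option.isSome_iff_exists.1
          ((PySem.List.index?_isSome_iff t (t.foldl min x)).2 hMmem)
        rw [if_neg hall, if_neg hnc, hM,
          PySem.List.index?_cons_of_ne t (ne_of_gt hMlt), hk]
        simp; ring
    · replace h : c ≤ x := not_lt.1 h
      rw [pvLoopA, if_neg (by rw [pvDigitVal_lt_iff]; exact not_lt.2 h), ih c p (i + 1)]
      have hM : (x :: t).foldl min c = t.foldl min c := by
        simp [List.foldl_cons, min_eq_left h]
      by_cases hall : ∀ y ∈ t, c ≤ y
      · rw [if_pos hall, if_pos (by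
          intro z hz; rcases List.mem_cons.1 hz with rfl | hz
          · exact h
          · exact hall z hz)]
      · obtain ⟨y, hy, hylt⟩ : ∃ y ∈ t, y < c := by simpa using hall
        have hnc : ¬ (∀ z ∈ x :: t, c ≤ z) := by
          intro hc; exact absurd (hc y (List.mem_cons_of_mem _ hy)) (not_le.2 hylt)
        have hMlt : t.foldl min c < c := lt_of_le_of_lt ((PySem.List.foldl_min_le t c).2 y hy) hylt
        have hMmem : t.foldl min c ∈ t := by
          rcases PySem.List.foldl_min_mem t c with h1 | h1
          · exact absurd h1 (ne_of_lt hMlt)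
          · exact h1
        obtain ⟨k, hk⟩ := Option.isSome_iff_exists.1
          ((PySem.List.index?_isSome_iff t (t.foldl min c)).2 hMmem)
        rw [if_neg hall, if_neg hnc, hM,
          PySem.List.index?_cons_of_ne t (ne_of_gt (lt_of_lt_of_le hMlt h)), hk]
        simp; ring

lemma pvRun_eq (l : List Char) : pvRunA l = pvRunB l := by
  cases l with
  | nil => rfl
  | cons c t =>
    rw [pvRunA, pvRunB, PySem.List.min?_id_cons, pvLoopA_spec (c :: t) c 1 1]
    dsimp only
    have hM : (c :: t).foldl min c = t.foldl min c := by
      simp [List.foldl_cons]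
    by_cases hall : ∀ x ∈ c :: t, c ≤ x
    · have hall' : ∀ y ∈ t, c ≤ y := fun y hy => hall y (List.mem_cons_of_mem _ hy)
      rw [if_pos hall, pvFoldlMin_eq_self hall', PySem.List.index?_cons_self]
      simp
    · rw [if_neg hall, hM]
      ring

-- ===== VERDICT (by name: the statement is the Claim_ definition above) =====
theorem min_index_position_digit_spec : Claim_equal_min_index_position_digit := by
  intro number _
  unfold Spec_min_index_position_digit min_index_position_digit min_index_position_digit_alt
  exact pvRun_eq _
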